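-- pv_equiv track=rewrite | github.com/jsbake2/eq2emu | scripts/gen-mastercrafted-handouts.py | slot_tags
-- ===== SOURCE A (Python) =====
-- SLOT_BIT_TO_TAG = {
--     0: "primary", 1: "secondary",
--     2: "head", 3: "chest", 4: "shoulders", 5: "forearms",
--     6: "hands", 7: "legs", 8: "feet",
--     9: "ring", 10: "ring",
--     11: "ear", 12: "ear",
--     13: "neck",
--     14: "wrist", 15: "wrist",
--     16: "ranged",
--     17: "ammo",
--     18: "waist",
--     19: "cloak",
--     20: "charm", 21: "charm",
--     22: "food", 23: "drink",
-- }
--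
-- def slot_tags(slots_int):
--     """Translate items.slots bitmask to a sorted set of friendly slot tags."""
--     if not slots_int:
--         return []
--     tags = set()
--     for bit, tag in SLOT_BIT_TO_TAG.items():
--         if slots_int & (1 << bit):
--             tags.add(tag)
--     return sorted(tags)
-- ===== SOURCE B (Python) =====
-- # Each distinct tag with the mask of all its bits, pre-sorted alphabetically by tag,
-- # so membership is one mask test per tag and the output needs no set and no sort.
-- TAG_MASKS = [
--     ("ammo", 1 << 17),
--     ("charm", (1 << 20) | (1 << 21)),
--     ("chest", 1 << 3),
--     ("cloak", 1 << 19),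
--     ("drink", 1 << 23),
--     ("ear", (1 << 11) | (1 << 12)),
--     ("feet", 1 << 8),
--     ("food", 1 << 22),
--     ("forearms", 1 << 5),
--     ("hands", 1 << 6),
--     ("head", 1 << 2),
--     ("legs", 1 << 7),
--     ("neck", 1 << 13),
--     ("primary", 1 << 0),
--     ("ranged", 1 << 16),
--     ("ring", (1 << 9) | (1 << 10)),
--     ("secondary", 1 << 1),
--     ("shoulders", 1 << 4),
--     ("waist", 1 << 18),
--     ("wrist", (1 << 14) | (1 << 15)),
-- ]
--
-- def slot_tags(slots_int):
--     """Translate items.slots bitmask to a sorted set of friendly slot tags."""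
--     return [tag for tag, mask in TAG_MASKS if slots_int & mask]
-- ===== Notes on version B (the rewrite author's own statement) =====
-- stated objective: simpler
-- what changed: B replaces the bit→tag dict scan plus set plus final sort with a precomputed alphabetically-sorted list of (tag, combined mask) pairs: one mask test per distinct tag and a direct list comprehension, so the set, the sort and the empty-guard disappear.
import Mathlib
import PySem

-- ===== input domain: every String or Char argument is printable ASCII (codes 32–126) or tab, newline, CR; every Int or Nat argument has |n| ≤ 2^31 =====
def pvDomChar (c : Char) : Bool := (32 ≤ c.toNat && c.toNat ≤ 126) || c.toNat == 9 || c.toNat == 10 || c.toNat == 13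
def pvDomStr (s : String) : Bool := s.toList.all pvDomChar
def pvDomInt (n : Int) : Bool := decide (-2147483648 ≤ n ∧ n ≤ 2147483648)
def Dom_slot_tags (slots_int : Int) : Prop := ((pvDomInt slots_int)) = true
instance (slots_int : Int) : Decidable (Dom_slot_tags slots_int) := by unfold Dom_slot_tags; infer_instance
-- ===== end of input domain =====

-- B replaces A's bit→tag dict scan + set + final sort with a precomputed alphabetically
-- sorted (tag, combined-mask) table and one mask test per distinct tag (simpler decomposition).

-- ===== PORT A =====
def SLOT_BIT_TO_TAG : PySem.Dict Int String :=
  PySem.Dict.ofList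
  [(0, "primary"), (1, "secondary"),
   (2, "head"), (3, "chest"), (4, "shoulders"), (5, "forearms"),
   (6, "hands"), (7, "legs"), (8, "feet"),
   (9, "ring"), (10, "ring"),
   (11, "ear"), (12, "ear"),
   (13, "neck"),
   (14, "wrist"), (15, "wrist"),
   (16, "ranged"),
   (17, "ammo"),
   (18, "waist"),
   (19, "cloak"),
   (20, "charm"), (21, "charm"),
   (22, "food"), (23, "drink")]

-- 'if not slots_int' on an int is 'slots_int == 0'; the dict keys are the nonneg literals
-- 0..23, so Python's '1 << bit' is '1 <<< bit.toNat'; set → PySem.Set, sorted → PySem.List.sorted.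
def slot_tags (slots_int : Int) : List String :=
  if slots_int = 0 then []
  else
    let tags : PySem.Set String :=
      SLOT_BIT_TO_TAG.items.foldl
        (fun t p =>
          if PySem.Int.band slots_int ((1 : Int) <<< p.1.toNat) ≠ 0 then PySem.Set.add t p.2 else t)
        PySem.Set.empty
    PySem.List.sorted tags (fun x => x) false

-- ===== PORT B =====
-- Source B's TAG_MASKS table: each distinct tag with the bitwise-or of its slot bits,
-- pre-sorted alphabetically by tag ('|' → PySem.Int.bor, '1 << k' → '1 <<< k').
def TAG_MASKS : List (String × Int) :=
  [("ammo", (1 : Int) <<< 17),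
   ("charm", PySem.Int.bor ((1 : Int) <<< 20) ((1 : Int) <<< 21)),
   ("chest", (1 : Int) <<< 3),
   ("cloak", (1 : Int) <<< 19),
   ("drink", (1 : Int) <<< 23),
   ("ear", PySem.Int.bor ((1 : Int) <<< 11) ((1 : Int) <<< 12)),
   ("feet", (1 : Int) <<< 8),
   ("food", (1 : Int) <<< 22),
   ("forearms", (1 : Int) <<< 5),
   ("hands", (1 : Int) <<< 6),
   ("head", (1 : Int) <<< 2),
   ("legs", (1 : Int) <<< 7),
   ("neck", (1 : Int) <<< 13),
   ("primary", (1 : Int) <<< 0),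
   ("ranged", (1 : Int) <<< 16),
   ("ring", PySem.Int.bor ((1 : Int) <<< 9) ((1 : Int) <<< 10)),
   ("secondary", (1 : Int) <<< 1),
   ("shoulders", (1 : Int) <<< 4),
   ("waist", (1 : Int) <<< 18),
   ("wrist", PySem.Int.bor ((1 : Int) <<< 14) ((1 : Int) <<< 15))]

-- the list comprehension '[tag for tag, mask in TAG_MASKS if slots_int & mask]'
def slot_tags_alt (slots_int : Int) : List String :=
  (TAG_MASKS.filter (fun p => PySem.Int.band slots_int p.2 != 0)).map Prod.fst

-- ===== PRECONDITION & SPEC =====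
def Spec_slot_tags (slots_int : Int) (out : List String) : Prop := out = slot_tags_alt slots_int
instance (slots_int : Int) (out : List String) : Decidable (Spec_slot_tags slots_int out) := by unfold Spec_slot_tags; infer_instance

-- ===== CLAIM (what is proved, stated in full; the proofs are below) =====
def Claim_equal_slot_tags : Prop := ∀ (slots_int : Int), Dom_slot_tags slots_int → Spec_slot_tags slots_int (slot_tags slots_int)

-- ===== LEMMAS AND PROOFS =====

-- the input masked to the 24 tagged bits, as a Nat (negatives included, Python semantics)
def maskN (s : Int) : Nat := (PySem.Int.band s 0xFFFFFF).toNat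

theorem and_ne_self_iff (x y : Nat) : x &&& y ≠ x ↔ ∃ i, x.testBit i ∧ ¬ y.testBit i := by
  constructor
  · intro h
    by_contra hc; push Not at hc
    exact h (Nat.eq_of_testBit_eq (fun i => by
      rw [Nat.testBit_and]
      cases hx : x.testBit i
      · simp
      · simp [hc i hx]))
  · rintro ⟨i, hx, hy⟩ h
    have := congrArg (fun n => n.testBit i) h
    simp [Nat.testBit_and, hx] at this
    exact hy this

theorem and_ne_zero_iff (x y : Nat) : x &&& y ≠ 0 ↔ ∃ i, x.testBit i ∧ y.testBit i := by
  constructor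
  · intro h
    by_contra hc; push Not at hc
    exact h (Nat.eq_of_testBit_eq (fun i => by
      rw [Nat.testBit_and]
      cases hx : x.testBit i
      · simp
      · simp [hc i hx]))
  · rintro ⟨i, hx, hy⟩ h
    have := congrArg (fun n => n.testBit i) h
    simp [Nat.testBit_and, hx, hy] at this

-- bit i (i < 24) of the masked input, when the input is negative, is the complement of (-s-1)'s bit
theorem maskN_testBit_neg (s : Int) (h : ¬ 0 ≤ s) (i : Nat) (hi : i < 24) :
    (maskN s).testBit i = ! (-s - 1).toNat.testBit i := by
  rw [maskN, PySem.Int.band.eq_1, if_neg h, if_pos (by norm_num : (0 : Int) ≤ 0xFFFFFF),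
    Int.toNat_natCast]
  set y := (-s - 1).toNat with hy
  have hv : ((0xFFFFFF : Int)).toNat = 2 ^ 24 - 1 := rfl
  rw [hv]
  have hmod : (2 ^ 24 - 1) &&& y = y % 2 ^ 24 := by
    rw [Nat.and_comm, Nat.and_two_pow_sub_one_eq_mod]
  have hsub : (2 ^ 24 - 1) - y % 2 ^ 24 = 2 ^ 24 - (y % 2 ^ 24 + 1) := by omega
  rw [hmod, hsub, Nat.testBit_two_pow_sub_succ (Nat.mod_lt _ (by norm_num)),
    Nat.testBit_mod_two_pow]
  simp [hi]

-- the Python test 'slots_int & m' for a mask 0 ≤ m < 2^24, reduced to bits of the masked input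
theorem band_mask_iff (s : Int) (m : Nat) (hm : m < 2 ^ 24) :
    (PySem.Int.band s (m : Int) ≠ 0) ↔ (maskN s) &&& m ≠ 0 := by
  by_cases h : 0 ≤ s
  · have hb : PySem.Int.band s (m : Int) = ((s.toNat &&& m : Nat) : Int) := by
      rw [PySem.Int.band_of_nonneg h (by positivity), Int.toNat_natCast]
    have hN : maskN s = s.toNat &&& (2 ^ 24 - 1) := by
      rw [maskN, show ((0xFFFFFF : Int)) = ((2 ^ 24 - 1 : Nat) : Int) by norm_num,
        PySem.Int.band_of_nonneg h (by positivity), Int.toNat_natCast, Int.toNat_natCast]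
    have heq : (maskN s) &&& m = s.toNat &&& m := by
      rw [hN, Nat.and_assoc]
      congr 1
      rw [Nat.and_comm, Nat.and_two_pow_sub_one_eq_mod, Nat.mod_eq_of_lt hm]
    rw [hb, heq]
    exact_mod_cast Iff.rfl
  · have hb : PySem.Int.band s (m : Int) = ((m - (m &&& (-s - 1).toNat) : Nat) : Int) := by
      rw [PySem.Int.band.eq_1, if_neg h, if_pos (by positivity : (0 : Int) ≤ (m : Int)),
        Int.toNat_natCast]
    set y := (-s - 1).toNat with hy
    have hle : m &&& y ≤ m := Nat.and_le_left
    rw [hb]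
    have h1 : ((m - (m &&& y) : Nat) : Int) ≠ 0 ↔ m &&& y ≠ m := by
      constructor
      · intro hne he; exact hne (by rw [he]; simp)
      · intro hne hz
        have : m - (m &&& y) = 0 := by exact_mod_cast hz
        omega
    rw [h1, and_ne_self_iff, and_ne_zero_iff]
    constructor
    · rintro ⟨i, hxi, hyi⟩
      have hi24 : i < 24 := by
        by_contra hge
        rw [Nat.testBit_lt_two_pow (lt_of_lt_of_le hm (Nat.pow_le_pow_right (by norm_num) (by omega)))] at hxi
        exact Bool.false_ne_true hxi
      refine ⟨i, ?_, hxi⟩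
      rw [maskN_testBit_neg s h i hi24]
      simp only [Bool.not_eq_true] at hyi
      show (!(-s - 1).toNat.testBit i) = true
      rw [show (-s - 1).toNat.testBit i = y.testBit i from rfl, hyi]
      rfl
    · rintro ⟨i, hNi, hmi⟩
      have hi24 : i < 24 := by
        by_contra hge
        rw [Nat.testBit_lt_two_pow (lt_of_lt_of_le hm (Nat.pow_le_pow_right (by norm_num) (by omega)))] at hmi
        exact Bool.false_ne_true hmi
      refine ⟨i, hmi, ?_⟩
      rw [maskN_testBit_neg s h i hi24] at hNi
      simp only [Bool.not_eq_true'] at hNi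
      rw [Bool.not_eq_true]
      exact hNi

theorem or_eq_zero_iff_nat (x y : Nat) : x ||| y = 0 ↔ x = 0 ∧ y = 0 := by
  constructor
  · intro h
    refine ⟨Nat.eq_of_testBit_eq (fun i => ?_), Nat.eq_of_testBit_eq (fun i => ?_)⟩ <;>
    · have := congrArg (fun n => Nat.testBit n i) h
      simp [Nat.testBit_or] at this
      simp [this.1, this.2]
  · rintro ⟨hx, hy⟩; simp [hx, hy]

-- single-bit test: A's and B's one-bit masks, as a conditional rewrite for simp
theorem band_one_shl_iff (s i : Int) (h1 : 0 ≤ i) (h2 : i < 24) :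
    (PySem.Int.band s ((1 : Int) <<< i) = 0) ↔ ((maskN s).testBit i.toNat = false) := by
  obtain ⟨n, rfl⟩ := Int.eq_ofNat_of_zero_le h1
  have hn : n < 24 := by exact_mod_cast h2
  have hsh : (1 : Int) <<< ((n : Nat) : Int) = ((2 ^ n : Nat) : Int) := by
    rw [Int.one_shiftLeft]
  rw [hsh, ← not_iff_not, ← Ne,
    band_mask_iff s (2 ^ n) (Nat.pow_lt_pow_right (by norm_num) hn), Nat.and_two_pow,
    Int.toNat_natCast]
  cases h : (maskN s).testBit n <;> simp

-- two-bit test: B's combined masks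
theorem band_bor_shl_iff (s i j : Int) (h1 : 0 ≤ i) (h2 : i < 24) (h3 : 0 ≤ j) (h4 : j < 24) :
    (PySem.Int.band s (PySem.Int.bor ((1 : Int) <<< i) ((1 : Int) <<< j)) = 0) ↔
      ((maskN s).testBit i.toNat = false ∧ (maskN s).testBit j.toNat = false) := by
  obtain ⟨n, rfl⟩ := Int.eq_ofNat_of_zero_le h1
  obtain ⟨m, rfl⟩ := Int.eq_ofNat_of_zero_le h3
  have hn : n < 24 := by exact_mod_cast h2
  have hm : m < 24 := by exact_mod_cast h4
  have hsh : ∀ k : Nat, (1 : Int) <<< ((k : Nat) : Int) = ((2 ^ k : Nat) : Int) := by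
    intro k; rw [Int.one_shiftLeft]
  have hlt : (2 ^ n ||| 2 ^ m : Nat) < 2 ^ 24 :=
    Nat.or_lt_two_pow (Nat.pow_lt_pow_right (by norm_num) hn)
      (Nat.pow_lt_pow_right (by norm_num) hm)
  rw [hsh n, hsh m, PySem.Int.bor_natCast, ← not_iff_not, ← Ne, band_mask_iff s _ hlt,
    Nat.and_or_distrib_left, Ne, or_eq_zero_iff_nat, Nat.and_two_pow, Nat.and_two_pow,
    Int.toNat_natCast, Int.toNat_natCast]
  cases hb1 : (maskN s).testBit n <;> cases hb2 : (maskN s).testBit m <;> simp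

theorem foldl_add_mem (l : List (Int × String)) (c : Int × String → Prop) [DecidablePred c]
    (t : PySem.Set String) (x : String) :
    (x ∈ l.foldl (fun t p => if c p then PySem.Set.add t p.2 else t) t) ↔
      (x ∈ t ∨ ∃ p ∈ l, c p ∧ p.2 = x) := by
  induction l generalizing t with
  | nil => simp
  | cons q qs ih =>
    simp only [List.foldl_cons]
    by_cases hq : c q
    · rw [if_pos hq, ih, PySem.Set.mem_add]
      constructor
      · rintro (⟨h | h⟩ | ⟨p, hp, hc, he⟩)
        · exact Or.inl h
        · exact Or.inr ⟨q, by simp, hq, h.symm⟩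
        · exact Or.inr ⟨p, by simp [hp], hc, he⟩
      · rintro (h | ⟨p, hp, hc, he⟩)
        · exact Or.inl (Or.inl h)
        · rcases List.mem_cons.mp hp with hpq | hpm
          · subst hpq; exact Or.inl (Or.inr he.symm)
          · exact Or.inr ⟨p, hpm, hc, he⟩
    · rw [if_neg hq, ih]
      constructor
      · rintro (h | ⟨p, hp, hc, he⟩)
        · exact Or.inl h
        · exact Or.inr ⟨p, by simp [hp], hc, he⟩
      · rintro (h | ⟨p, hp, hc, he⟩)
        · exact Or.inl h
        · rcases List.mem_cons.mp hp with hpq | hpm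
          · subst hpq; exact absurd hc hq
          · exact Or.inr ⟨p, hpm, hc, he⟩

theorem foldl_add_nodup (l : List (Int × String)) (c : Int × String → Prop) [DecidablePred c]
    (t : PySem.Set String) (ht : t.Nodup) :
    (l.foldl (fun t p => if c p then PySem.Set.add t p.2 else t) t).Nodup := by
  induction l generalizing t with
  | nil => exact ht
  | cons q qs ih =>
    simp only [List.foldl_cons]
    by_cases hq : c q
    · rw [if_pos hq]; exact ih _ (PySem.Set.nodup_add t q.2 ht)
    · rw [if_neg hq]; exact ih _ ht

-- the dict's items, written out
theorem items_eq : SLOT_BIT_TO_TAG.items =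
    [((0:Int), "primary"), (1, "secondary"),
     (2, "head"), (3, "chest"), (4, "shoulders"), (5, "forearms"),
     (6, "hands"), (7, "legs"), (8, "feet"),
     (9, "ring"), (10, "ring"),
     (11, "ear"), (12, "ear"),
     (13, "neck"),
     (14, "wrist"), (15, "wrist"),
     (16, "ranged"),
     (17, "ammo"),
     (18, "waist"),
     (19, "cloak"),
     (20, "charm"), (21, "charm"),
     (22, "food"), (23, "drink")] := by decide

theorem mem_alt_iff (s : Int) (x : String) :
    x ∈ slot_tags_alt s ↔ ∃ p ∈ TAG_MASKS, PySem.Int.band s p.2 ≠ 0 ∧ p.1 = x := by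
  simp [slot_tags_alt, List.mem_filter, bne_iff_ne]

theorem imp_pair_or (a b : Bool) (P : Prop) :
    (((a = false → b = true) ∧ P) ↔ (a = true ∧ P ∨ b = true ∧ P)) := by
  cases a <;> cases b <;> tauto

set_option maxHeartbeats 2000000 in
theorem mem_iff (s : Int) (x : String) :
    x ∈ slot_tags_alt s ↔
      x ∈ SLOT_BIT_TO_TAG.items.foldl
        (fun t p =>
          if PySem.Int.band s ((1 : Int) <<< p.1.toNat) ≠ 0 then PySem.Set.add t p.2 else t)
        PySem.Set.empty := by
  rw [mem_alt_iff,
    foldl_add_mem _ (fun p => PySem.Int.band s ((1 : Int) <<< (↑p.1.toNat : Int)) ≠ 0) _ x, items_eq]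
  simp only [TAG_MASKS, List.mem_cons, List.not_mem_nil, or_false, PySem.Set.empty]
  simp [band_one_shl_iff, band_bor_shl_iff]
  simp only [imp_pair_or]
  exact Iff.of_eq (by ac_rfl)

-- B's table is strictly sorted by tag, so the filtered output is strictly sorted
theorem pairwise_tagmasks : (TAG_MASKS.map Prod.fst).Pairwise (· < ·) := by
  refine List.Pairwise.imp (fun h => String.lt_iff_toList_lt.mpr h) ?_
  decide

theorem alt_pairwise (s : Int) : (slot_tags_alt s).Pairwise (· < ·) :=
  List.Pairwise.sublist (List.Sublist.map Prod.fst List.filter_sublist) pairwise_tagmasks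

theorem alt_nodup (s : Int) : (slot_tags_alt s).Nodup :=
  (alt_pairwise s).imp (fun h => ne_of_lt h)

-- ===== VERDICT (by name: the statement is the Claim_ definition above) =====
theorem slot_tags_spec : Claim_equal_slot_tags := by
  intro s _
  show slot_tags s = slot_tags_alt s
  by_cases h0 : s = 0
  · subst h0
    rw [slot_tags, if_pos rfl]
    decide
  · rw [slot_tags, if_neg h0]
    refine PySem.List.sorted_eq_of_perm_of_pairwise_lt _ _ _ ?_ (alt_pairwise s)
    exact (List.perm_ext_iff_of_nodup (alt_nodup s)
      (foldl_add_nodup _ _ PySem.Set.empty List.nodup_nil)).mpr (fun x => mem_iff s x)
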